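-- pv_equiv track=rewrite | github.com/sujitpatel2739/Retrieval_Augmented_Generation_Project | tests/general.py | _post_process_merge
-- ===== SOURCE A (Python) =====
-- from typing import List, Dict, Tuple, Any
--
-- def _post_process_merge(items: List[Dict[str, str]]) -> List[Dict[str, str]]:
--     """
--     Minor pass to:
--      - merge adjacent NormalText lines into a single NormalText paragraph
--      - keep bullets as individual items
--      - optionally combine Heading + Bullet groupings (not implemented here)
--     """
--     merged = []
--     buffer_par = []
--     for it in items:
--         t = it["section_type"]
--         c = it["content"]
--         if t == "NormalText":
--             buffer_par.append(c)
--         else: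
--             if buffer_par:
--                 merged.append({"section_type": "NormalText", "content": " ".join(buffer_par)})
--                 buffer_par = []
--             merged.append(it)
--     if buffer_par:
--         merged.append({"section_type": "NormalText", "content": " ".join(buffer_par)})
--     return merged
-- ===== SOURCE B (Python) =====
-- def _post_process_merge(items):
--     # Right-to-left pass: walk reversed(items) and merge a NormalText item into the
--     # NormalText paragraph already at the front of the result (if any).
--     out = []
--     for it in reversed(items):
--         if it["section_type"] == "NormalText":
--             if out and out[0]["section_type"] == "NormalText":
--                 out[0] = {"section_type": "NormalText",
--                           "content": it["content"] + " " + out[0]["content"]}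
--             else:
--                 out.insert(0, {"section_type": "NormalText", "content": it["content"]})
--         else:
--             out.insert(0, it)
--     return out
-- ===== Notes on version B (the rewrite author's own statement) =====
-- stated objective: alternative
-- what changed: Replaces A's left-to-right pass with a mutable paragraph buffer and end-of-loop flush by a right-to-left pass over reversed(items) that merges each NormalText item directly into the already-built paragraph at the front of the result, so no buffer or final flush exists.
-- crash fix: On inputs where every item has 'section_type' and every NormalText item has 'content' but some non-NormalText item lacks 'content', A raises KeyError (it reads it['content'] for every item) while B returns the merged list with those items passed through unchanged. — e.g. on _post_process_merge([[("section_type", "Heading")]]): A raises KeyError, B returns [[("section_type", "Heading")]]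
import Mathlib
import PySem

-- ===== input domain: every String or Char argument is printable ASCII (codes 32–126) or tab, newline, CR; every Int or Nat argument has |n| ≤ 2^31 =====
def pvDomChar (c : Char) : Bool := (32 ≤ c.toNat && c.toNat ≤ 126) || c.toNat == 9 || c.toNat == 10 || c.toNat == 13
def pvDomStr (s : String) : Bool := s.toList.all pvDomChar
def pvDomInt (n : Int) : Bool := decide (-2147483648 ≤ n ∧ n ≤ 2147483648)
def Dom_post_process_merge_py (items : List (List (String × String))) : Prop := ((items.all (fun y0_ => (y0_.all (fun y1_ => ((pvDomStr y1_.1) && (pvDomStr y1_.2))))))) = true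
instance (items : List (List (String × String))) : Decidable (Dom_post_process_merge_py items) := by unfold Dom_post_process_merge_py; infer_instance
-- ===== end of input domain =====

-- B replaces A's left-to-right buffer-and-flush pass by a right-to-left pass that merges each
-- NormalText item into the paragraph already at the front of the result (objective: alternative).

-- dict[k] (first match in the association list; Pre_/Raises_ keep us where Python does not raise)
def pvLookup (d : List (String × String)) (k : String) : String :=
  match d.find? (fun p => p.1 == k) with
  | some p => p.2
  | none => ""

-- ===== PORT A =====
def post_process_merge_py (items : List (List (String × String))) : List (List (String × String)) :=
  let st := items.foldl
    (fun (st : List (List (String × String)) × List String) it =>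
      let t := pvLookup it "section_type"
      let c := pvLookup it "content"
      if t == "NormalText" then (st.1, st.2 ++ [c])
      else if st.2.isEmpty then (st.1 ++ [it], [])
      else (st.1 ++ [[("section_type", "NormalText"), ("content", PySem.Str.join " " st.2)], it], []))
    ([], [])
  if st.2.isEmpty then st.1
  else st.1 ++ [[("section_type", "NormalText"), ("content", PySem.Str.join " " st.2)]]

-- ===== PORT B =====
def pvIsText (it : List (String × String)) : Bool := pvLookup it "section_type" == "NormalText"

def pvCont (it : List (String × String)) : String := pvLookup it "content"

def pvTextDict (s : String) : List (String × String) :=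
  [("section_type", "NormalText"), ("content", s)]

-- one step of B's loop body: out is the result built so far (to the right of it)
def pvStep (out : List (List (String × String))) (it : List (String × String)) :
    List (List (String × String)) :=
  if pvIsText it then
    match out with
    | y :: ys =>
      if pvLookup y "section_type" == "NormalText" then
        pvTextDict (pvCont it ++ " " ++ pvCont y) :: ys
      else pvTextDict (pvCont it) :: y :: ys
    | [] => [pvTextDict (pvCont it)]
  else it :: out

-- 'for it in reversed(items): out = step(out, it)'
def post_process_merge_py_alt (items : List (List (String × String))) : List (List (String × String)) :=
  items.reverse.foldl pvStep []

-- ===== PRECONDITION & SPEC =====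
-- Pre_ excludes exactly the inputs on which A raises KeyError: some item missing the
-- "section_type" or "content" key.
def Pre_post_process_merge_py (items : List (List (String × String))) : Prop :=
  ∀ it ∈ items, "section_type" ∈ it.map Prod.fst ∧ "content" ∈ it.map Prod.fst
instance (items : List (List (String × String))) : Decidable (Pre_post_process_merge_py items) := by unfold Pre_post_process_merge_py; infer_instance

def pvWitness_post_process_merge_py : (List (List (String × String))) :=
  [[("section_type", "NormalText"), ("content", "a")],
   [("section_type", "Heading"), ("content", "h")],
   [("section_type", "NormalText"), ("content", "b")]]

-- On inputs where every item has "section_type" and every NormalText item has "content", but some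
-- (non-NormalText) item lacks "content", A raises KeyError while B returns the merged list with
-- those items passed through unchanged.
def Raises_post_process_merge_py (items : List (List (String × String))) : Prop :=
  (∀ it ∈ items, "section_type" ∈ it.map Prod.fst ∧
      (pvLookup it "section_type" = "NormalText" → "content" ∈ it.map Prod.fst)) ∧
  (∃ it ∈ items, "content" ∉ it.map Prod.fst)
instance (items : List (List (String × String))) : Decidable (Raises_post_process_merge_py items) := by unfold Raises_post_process_merge_py; infer_instance

def pvRaiseWitness_post_process_merge_py : (List (List (String × String))) :=
  [[("section_type", "Heading")]]
def pvRaiseWitnessOut_post_process_merge_py : List (List (String × String)) :=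
  [[("section_type", "Heading")]]

def Spec_post_process_merge_py (items : List (List (String × String))) (out : List (List (String × String))) : Prop := out = post_process_merge_py_alt items
instance (items : List (List (String × String))) (out : List (List (String × String))) : Decidable (Spec_post_process_merge_py items out) := by unfold Spec_post_process_merge_py; infer_instance

-- ===== CLAIM (what is proved, stated in full; the proofs are below) =====
def Claim_equal_post_process_merge_py : Prop := ∀ (items : List (List (String × String))), Dom_post_process_merge_py items → Pre_post_process_merge_py items → Spec_post_process_merge_py items (post_process_merge_py items)

def Claim_raises_post_process_merge_py : Prop := (∀ (items : List (List (String × String))), Dom_post_process_merge_py items → Raises_post_process_merge_py items → ¬ Pre_post_process_merge_py items) ∧ (Dom_post_process_merge_py (pvRaiseWitness_post_process_merge_py) ∧ Raises_post_process_merge_py (pvRaiseWitness_post_process_merge_py) ∧ post_process_merge_py_alt (pvRaiseWitness_post_process_merge_py) = pvRaiseWitnessOut_post_process_merge_py)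

-- ===== LEMMAS AND PROOFS =====

def pvFlush (buf : List String) : List (String × String) := pvTextDict (PySem.Str.join " " buf)

-- A's loop with remaining input and pending paragraph buffer
def pvH (buf : List String) : List (List (String × String)) → List (List (String × String))
  | [] => if buf.isEmpty then [] else [pvFlush buf]
  | x :: xs =>
    if pvIsText x then pvH (buf ++ [pvCont x]) xs
    else (if buf.isEmpty then [] else [pvFlush buf]) ++ x :: pvH [] xs

theorem pvFoldl_eq_pvH (items : List (List (String × String))) :
    ∀ (acc : List (List (String × String))) (buf : List String),
    (let st := items.foldl
      (fun (st : List (List (String × String)) × List String) it =>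
        let t := pvLookup it "section_type"
        let c := pvLookup it "content"
        if t == "NormalText" then (st.1, st.2 ++ [c])
        else if st.2.isEmpty then (st.1 ++ [it], [])
        else (st.1 ++ [[("section_type", "NormalText"), ("content", PySem.Str.join " " st.2)], it], []))
      (acc, buf)
     if st.2.isEmpty then st.1
     else st.1 ++ [[("section_type", "NormalText"), ("content", PySem.Str.join " " st.2)]])
    = acc ++ pvH buf items := by
  induction items with
  | nil =>
    intro acc buf
    by_cases h : buf.isEmpty <;> simp [pvH, h, pvFlush, pvTextDict]
  | cons x xs ih =>
    intro acc buf
    simp only [List.foldl_cons]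
    by_cases ht : pvIsText x
    · have ht' : (pvLookup x "section_type" == "NormalText") = true := by
        simpa [pvIsText] using ht
      simp only [ht', if_true]
      rw [ih]
      simp [pvH, ht, pvCont]
    · have ht' : (pvLookup x "section_type" == "NormalText") = false := by
        simpa [pvIsText] using ht
      simp only [ht', Bool.false_eq_true, if_false]
      by_cases hb : buf.isEmpty
      · rw [if_pos hb, ih]
        simp [pvH, ht, hb]
      · rw [if_neg hb, ih]
        simp [pvH, ht, hb, pvFlush, pvTextDict]

-- B written as a structural foldr
def pvB : List (List (String × String)) → List (List (String × String))
  | [] => []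
  | x :: xs => pvStep (pvB xs) x

theorem alt_eq_pvB (items : List (List (String × String))) :
    post_process_merge_py_alt items = pvB items := by
  unfold post_process_merge_py_alt
  rw [List.foldl_reverse]
  induction items with
  | nil => rfl
  | cons x xs ih => simp [pvB, List.foldr_cons, ih]

-- merging a finished paragraph s into the front of an already-built result
def pvMf (s : String) : List (List (String × String)) → List (List (String × String))
  | y :: ys =>
    if pvLookup y "section_type" == "NormalText" then pvTextDict (s ++ " " ++ pvCont y) :: ys
    else pvTextDict s :: y :: ys
  | [] => [pvTextDict s]

theorem pvStep_text (out : List (List (String × String))) (it : List (String × String))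
    (h : pvIsText it = true) : pvStep out it = pvMf (pvCont it) out := by
  cases out <;> simp [pvStep, pvMf, h]

theorem lookup_textDict (s : String) : pvLookup (pvTextDict s) "section_type" = "NormalText" := rfl

theorem cont_textDict (s : String) : pvCont (pvTextDict s) = s := rfl

theorem pvMf_comp (s c : String) (out : List (List (String × String))) :
    pvMf (s ++ " " ++ c) out = pvMf s (pvMf c out) := by
  cases out with
  | nil => simp [pvMf, lookup_textDict, cont_textDict]
  | cons y ys =>
    by_cases hy : pvLookup y "section_type" == "NormalText" <;>
      simp [pvMf, hy, lookup_textDict, cont_textDict, String.append_assoc]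

theorem join_cons_cons (sep a b : String) (bs : List String) :
    PySem.Str.join sep (a :: b :: bs) = a ++ sep ++ PySem.Str.join sep (b :: bs) := by
  have := PySem.Chars.join_cons_cons sep.toList a.toList b.toList (bs.map String.toList)
  simp [PySem.Str.join, PySem.Chars.join] at this ⊢
  rw [this]
  simp [String.ofList_append, String.append_assoc]

theorem join_singleton (c : String) : PySem.Str.join " " [c] = c := by
  simp [PySem.Str.join]

theorem join_append_singleton (buf : List String) (c : String) (h : buf ≠ []) :
    PySem.Str.join " " (buf ++ [c]) = PySem.Str.join " " buf ++ " " ++ c := by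
  induction buf with
  | nil => simp at h
  | cons a as ih =>
    cases as with
    | nil => simp [join_cons_cons, join_singleton]
    | cons b bs =>
      have h2 := ih (by simp)
      simp only [List.cons_append] at h2 ⊢
      rw [join_cons_cons, h2, join_cons_cons]
      simp [String.append_assoc]

-- joint invariant: A's pending buffer corresponds to pvMf of its join on B's result
theorem pvH_eq_pvB (xs : List (List (String × String))) :
    pvH [] xs = pvB xs ∧
    ∀ buf : List String, buf ≠ [] → pvH buf xs = pvMf (PySem.Str.join " " buf) (pvB xs) := by
  induction xs with
  | nil =>
    refine ⟨by simp [pvH, pvB], fun buf hb => ?_⟩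
    simp [pvH, pvB, pvMf, pvFlush, List.isEmpty_iff, hb]
  | cons x xs ih =>
    by_cases hx : pvIsText x
    · refine ⟨?_, fun buf hb => ?_⟩
      · have h1 := ih.2 [pvCont x] (by simp)
        simp only [pvH, hx, if_true, List.nil_append]
        rw [h1, join_singleton]
        simp [pvB, pvStep_text _ _ hx]
      · have h1 := ih.2 (buf ++ [pvCont x]) (by simp)
        simp only [pvH, hx, if_true]
        rw [h1, join_append_singleton _ _ hb, pvMf_comp]
        simp [pvB, pvStep_text _ _ hx]
    · have hx' : (pvLookup x "section_type" == "NormalText") = false := by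
        simpa [pvIsText] using hx
      refine ⟨?_, fun buf hb => ?_⟩
      · simp [pvH, hx, pvB, pvStep, ih.1]
      · simp [pvH, hx, List.isEmpty_iff, hb, pvB, pvStep, hx', pvMf, pvFlush, ih.1]

-- ===== VERDICT (by name: the statement is the Claim_ definition above) =====
theorem post_process_merge_py_spec : Claim_equal_post_process_merge_py := by
  intro items _ _
  unfold Spec_post_process_merge_py post_process_merge_py
  rw [pvFoldl_eq_pvH items [] [], alt_eq_pvB]
  simpa using (pvH_eq_pvB items).1

@[simp] theorem post_process_merge_py_raises : Claim_raises_post_process_merge_py := by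
  unfold Claim_raises_post_process_merge_py
  constructor
  · intro items _ hr hpre
    obtain ⟨it, hmem, hno⟩ := hr.2
    exact hno (hpre it hmem).2
  · exact ⟨by decide, by decide, by decide⟩
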